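-- pv_equiv track=rewrite | github.com/Mallku2/PLN-2015 | tagging/scripts/stats.py | calculate_counts
-- ===== SOURCE A (Python) =====
-- from collections import defaultdict
--
-- def calculate_counts(sents):
--     """Collects basic counts from the list of sentences received.
--
--         PARAMS
--         sents : a list of the form [ [ (word, tag) ] ] (where [ (word, tag) ]
--                 is a tagged sentence represented as a list of tagged words).
--
--         RETURNS
--         _quantity of sentences.
--         _words' occurrences.
--         _words' counts (from every sentence).
--         _tags' counts (from every sentence).
--         _Dict. of the form {tag X tag's occurences}
--         _Dict. of the form {tag X {word X occurrences of word tagged with tag}}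
--         _Dict. of the form {word X {tag X occurrences of word tagged with tag}}
--     """
--
--     words_occurrences = 0
--     dict_tags_count = defaultdict(int)
--     words_per_tags = {}
--     tags_per_words = {}
--
--     for sent in sents:
--         len_sent = len(sent)
--         words_occurrences += len_sent
--
--         for i in range(len_sent):
--             # Each element in sent is a tuple, corresponding to a tagged word.
--             tup = sent[i]
--             word, tag = tup[0], tup[1]
--
--             if tag not in words_per_tags:
--                 words_per_tags[tag] = defaultdict(int)
--
--             # {tag in words_per_tags.keys()}
--             words_per_tags[tag][word] += 1
--
--             dict_tags_count[tag] += 1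
--
--             if word not in tags_per_words:
--                 tags_per_words[word] = defaultdict(int)
--
--             # {word in tags_per_words.keys()}
--             tags_per_words[word][tag] += 1
--
--     return len(sents),\
--         words_occurrences,\
--         len(tags_per_words),\
--         len(words_per_tags),\
--         dict_tags_count,\
--         words_per_tags,\
--         tags_per_words
-- ===== SOURCE B (Python) =====
-- from collections import defaultdict
--
--
-- def calculate_counts(sents):
--     """Same counts as A, built by staged comprehensions: flatten once, dedup the
--     keys in first-occurrence order, and compute every count with .count()."""
--     pairs = [tup for sent in sents for tup in sent]
--     tags = [p[1] for p in pairs]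
--     words = [p[0] for p in pairs]
--     distinct_tags = list(dict.fromkeys(tags))
--     distinct_words = list(dict.fromkeys(words))
--
--     dict_tags_count = defaultdict(int, {t: tags.count(t) for t in distinct_tags})
--     words_per_tags = {
--         t: defaultdict(int,
--                        {w: pairs.count((w, t))
--                         for w in dict.fromkeys(q[0] for q in pairs if q[1] == t)})
--         for t in distinct_tags}
--     tags_per_words = {
--         w: defaultdict(int,
--                        {tg: pairs.count((w, tg))
--                         for tg in dict.fromkeys(q[1] for q in pairs if q[0] == w)})
--         for w in distinct_words}
--
--     return (len(sents), len(pairs), len(distinct_words), len(distinct_tags),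
--             dict_tags_count, words_per_tags, tags_per_words)
-- ===== Notes on version B (the rewrite author's own statement) =====
-- stated objective: alternative
-- what changed: Instead of A's single token loop that increments three dicts per word, B flattens the corpus once, dedups tags/words in first-occurrence order with dict.fromkeys, and builds each of the three tables independently by comprehensions whose counts come from list.count over the flat pair list.
import Mathlib
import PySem

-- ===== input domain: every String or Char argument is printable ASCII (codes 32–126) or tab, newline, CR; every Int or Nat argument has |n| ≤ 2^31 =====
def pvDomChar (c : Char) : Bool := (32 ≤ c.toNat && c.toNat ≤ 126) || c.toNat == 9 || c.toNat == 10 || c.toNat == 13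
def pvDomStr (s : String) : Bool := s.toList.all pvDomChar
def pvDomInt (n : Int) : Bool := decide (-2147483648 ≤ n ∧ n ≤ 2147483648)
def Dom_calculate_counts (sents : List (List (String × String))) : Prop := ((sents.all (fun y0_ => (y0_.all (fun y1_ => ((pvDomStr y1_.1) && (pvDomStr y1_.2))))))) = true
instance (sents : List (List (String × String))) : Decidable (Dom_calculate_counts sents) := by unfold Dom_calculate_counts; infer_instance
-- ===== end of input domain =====

-- B replaces A's per-token triple-dict-update loop by staged comprehensions: flatten once,
-- dedup keys in first-occurrence order, compute each count with list.count (objective: alternative).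

-- ===== PORT A =====
-- Body of A's inner loop: updates (dict_tags_count, words_per_tags, tags_per_words) for one tagged word.
def pvBodyA
    (ds : PySem.Dict String Int × PySem.Dict String (PySem.Dict String Int) × PySem.Dict String (PySem.Dict String Int))
    (tup : String × String) :
    PySem.Dict String Int × PySem.Dict String (PySem.Dict String Int) × PySem.Dict String (PySem.Dict String Int) :=
  let word := tup.1
  let tag := tup.2
  -- if tag not in words_per_tags: words_per_tags[tag] = defaultdict(int)
  let wpt0 := if ds.2.1.contains tag then ds.2.1 else ds.2.1.insert tag PySem.Dict.empty
  -- words_per_tags[tag][word] += 1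
  let wpt := wpt0.insert tag ((wpt0.getD tag PySem.Dict.empty).modify word 0 (· + 1))
  -- dict_tags_count[tag] += 1
  let tc := ds.1.modify tag 0 (· + 1)
  -- if word not in tags_per_words: tags_per_words[word] = defaultdict(int)
  let tpw0 := if ds.2.2.contains word then ds.2.2 else ds.2.2.insert word PySem.Dict.empty
  -- tags_per_words[word][tag] += 1
  let tpw := tpw0.insert word ((tpw0.getD word PySem.Dict.empty).modify tag 0 (· + 1))
  (tc, wpt, tpw)

def calculate_counts (sents : List (List (String × String))) : Int × Int × Int × Int × (List (String × Int)) × (List (String × List (String × Int))) × (List (String × List (String × Int))) :=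
  let st := sents.foldl
    (fun st sent =>
      let len_sent : Int := sent.length
      let wo := st.1 + len_sent
      -- for i in range(len_sent): tup = sent[i]; …   (i always in range, so the getD default is never used)
      let ds := (PySem.List.pyRange 0 len_sent 1).foldl
        (fun ds i => pvBodyA ds (PySem.List.pyGetD sent i ("", ""))) st.2
      (wo, ds))
    ((0 : Int), PySem.Dict.empty, PySem.Dict.empty, PySem.Dict.empty)
  ((sents.length : Int), st.1, (st.2.2.2.size : Int), (st.2.2.1.size : Int),
   st.2.1.items,
   st.2.2.1.items.map (fun p => (p.1, p.2.items)),
   st.2.2.2.items.map (fun p => (p.1, p.2.items)))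

-- ===== PORT B =====
def calculate_counts_alt (sents : List (List (String × String))) : Int × Int × Int × Int × (List (String × Int)) × (List (String × List (String × Int))) × (List (String × List (String × Int))) :=
  -- pairs = [tup for sent in sents for tup in sent]
  let pairs := sents.flatMap (fun sent => sent)
  let tags := pairs.map (fun p => p.2)
  let words := pairs.map (fun p => p.1)
  -- list(dict.fromkeys(…)): first-occurrence dedup
  let distinct_tags := PySem.List.dedup tags
  let distinct_words := PySem.List.dedup words
  let dict_tags_count := distinct_tags.map (fun t => (t, (tags.count t : Int)))
  let words_per_tags := distinct_tags.map (fun t =>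
    (t, (PySem.List.dedup ((pairs.filter (fun q => q.2 == t)).map (fun q => q.1))).map
          (fun w => (w, (pairs.count (w, t) : Int)))))
  let tags_per_words := distinct_words.map (fun w =>
    (w, (PySem.List.dedup ((pairs.filter (fun q => q.1 == w)).map (fun q => q.2))).map
          (fun tg => (tg, (pairs.count (w, tg) : Int)))))
  ((sents.length : Int), (pairs.length : Int), (distinct_words.length : Int),
   (distinct_tags.length : Int), dict_tags_count, words_per_tags, tags_per_words)

-- ===== PRECONDITION & SPEC =====
def Spec_calculate_counts (sents : List (List (String × String))) (out : Int × Int × Int × Int × (List (String × Int)) × (List (String × List (String × Int))) × (List (String × List (String × Int)))) : Prop := out = calculate_counts_alt sents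
instance (sents : List (List (String × String))) (out : Int × Int × Int × Int × (List (String × Int)) × (List (String × List (String × Int))) × (List (String × List (String × Int)))) : Decidable (Spec_calculate_counts sents out) := by
  unfold Spec_calculate_counts
  letI h1 : DecidableEq (List (String × Int)) := inferInstance
  letI h2 : DecidableEq (List (String × List (String × Int))) := inferInstance
  infer_instance

-- ===== CLAIM (what is proved, stated in full; the proofs are below) =====
def Claim_equal_calculate_counts : Prop := ∀ (sents : List (List (String × String))), Dom_calculate_counts sents → Spec_calculate_counts sents (calculate_counts sents)

-- ===== LEMMAS AND PROOFS =====

-- count over a map, as a countP over the source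
theorem pv_count_map {α β : Type} [BEq β] [LawfulBEq β] (l : List α) (f : α → β) (y : β) :
    (l.map f).count y = l.countP (fun x => f x == y) := by
  simp [List.count_eq_countP, List.countP_map]; rfl

-- ---- A's group loop (dict mapping a key to a dict of value-counts), canonical form ----

def pvGStep (key val : (String × String) → String)
    (d : PySem.Dict String (PySem.Dict String Int)) (p : String × String) :
    PySem.Dict String (PySem.Dict String Int) :=
  d.insert (key p) ((d.getD (key p) PySem.Dict.empty).modify (val p) 0 (· + 1))

def pvGCanon (key val : (String × String) → String) (l : List (String × String)) :
    PySem.Dict String (PySem.Dict String Int) :=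
  PySem.Dict.mk ((PySem.Set.ofList (l.map key)).map
    (fun t => (t, PySem.Dict.counter ((l.filter (fun p => key p == t)).map val))))

theorem pv_gCanon_keys (key val : (String × String) → String) (l : List (String × String)) :
    (pvGCanon key val l).keys = PySem.Set.ofList (l.map key) := by
  simp [pvGCanon, PySem.Dict.keys_mk, Function.comp_def]

theorem pv_gCanon_getD (key val : (String × String) → String) (l : List (String × String)) (k : String) :
    (pvGCanon key val l).getD k PySem.Dict.empty
      = PySem.Dict.counter ((l.filter (fun p => key p == k)).map val) := by
  by_cases hk : k ∈ PySem.Set.ofList (l.map key)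
  · refine PySem.Dict.getD_of_mem_items _ ?_ ?_ _
    · exact List.mem_map.mpr ⟨k, hk, rfl⟩
    · rw [pv_gCanon_keys]; exact PySem.Set.nodup_ofList _
  · have hfil : l.filter (fun p => key p == k) = [] := by
      rw [List.filter_eq_nil_iff]
      intro p hp hbeq
      exact hk ((PySem.Set.mem_ofList _ _).mpr ((eq_of_beq hbeq) ▸ List.mem_map_of_mem (f := key) hp))
    have hc : (pvGCanon key val l).contains k = false := by
      rw [PySem.Dict.contains_eq_decide_mem_keys, pv_gCanon_keys, decide_eq_false_iff_not]
      exact hk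
    rw [hfil, PySem.Dict.getD_of_not_contains _ _ hc]
    rfl

theorem pv_gStep_canon (key val : (String × String) → String) (l : List (String × String))
    (p : String × String) :
    pvGStep key val (pvGCanon key val l) p = pvGCanon key val (l ++ [p]) := by
  have harg : ((l.filter (fun q => key q == key p)).map val) ++ [val p]
      = (((l ++ [p]).filter (fun q => key q == key p)).map val) := by
    rw [List.filter_append]; simp
  have hkeys : (l ++ [p]).map key = l.map key ++ [key p] := by simp
  unfold pvGStep
  rw [pv_gCanon_getD, ← PySem.Dict.counter_append_singleton, harg]
  apply PySem.Dict.ext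
  by_cases hk : key p ∈ PySem.Set.ofList (l.map key)
  · have hc : (pvGCanon key val l).contains (key p) = true := by
      rw [PySem.Dict.contains_eq_decide_mem_keys, pv_gCanon_keys, decide_eq_true_eq]
      exact hk
    rw [PySem.Dict.items_insert_of_contains _ _ hc]
    show (List.map _ (pvGCanon key val l).items) = (pvGCanon key val (l ++ [p])).items
    simp only [pvGCanon, hkeys]
    rw [PySem.Set.ofList_append_singleton, PySem.Set.add_of_mem hk, List.map_map]
    apply List.map_congr_left
    intro t ht
    by_cases htp : t = key p
    · subst htp
      simp
    · have hne : ∀ q ∈ [p], ¬ (key q == t) = true := by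
        intro q hq
        rw [List.mem_singleton.mp hq]
        simp only [beq_iff_eq]
        exact fun h => htp h.symm
      simp only [Function.comp_apply]
      rw [if_neg (by simpa using htp)]
      have : (l ++ [p]).filter (fun q => key q == t) = l.filter (fun q => key q == t) := by
        rw [List.filter_append, List.filter_eq_nil_iff.mpr hne, List.append_nil]
      rw [this]
  · have hc : (pvGCanon key val l).contains (key p) = false := by
      rw [PySem.Dict.contains_eq_decide_mem_keys, pv_gCanon_keys, decide_eq_false_iff_not]
      exact hk
    rw [PySem.Dict.items_insert_of_not_contains _ _ hc]
    show (pvGCanon key val l).items ++ _ = (pvGCanon key val (l ++ [p])).items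
    simp only [pvGCanon, hkeys]
    rw [PySem.Set.ofList_append_singleton, PySem.Set.add_of_not_mem hk, List.map_append,
      List.map_cons, List.map_nil]
    congr 1
    apply List.map_congr_left
    intro t ht
    have htp : t ≠ key p := fun h => hk (h ▸ ht)
    have hne : (key p == t) = false := beq_eq_false_iff_ne.mpr (fun h => htp h.symm)
    have : (l ++ [p]).filter (fun q => key q == t) = l.filter (fun q => key q == t) := by
      simp [List.filter_append, hne]
    rw [this]

theorem pv_foldl_gStep (key val : (String × String) → String) (l : List (String × String)) :
    l.foldl (pvGStep key val) PySem.Dict.empty = pvGCanon key val l := by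
  induction l using List.reverseRecOn with
  | nil => rfl
  | append_singleton l p ih =>
    rw [List.foldl_append, List.foldl_cons, ih, List.foldl_nil, pv_gStep_canon]

-- ---- reducing A's loop body to the canonical step ----

theorem pv_stepA_reduce (d : PySem.Dict String (PySem.Dict String Int)) (k w : String) :
    (let d0 := if d.contains k then d else d.insert k PySem.Dict.empty
     d0.insert k ((d0.getD k PySem.Dict.empty).modify w 0 (· + 1)))
      = d.insert k ((d.getD k PySem.Dict.empty).modify w 0 (· + 1)) := by
  by_cases hc : d.contains k
  · simp only [hc, if_true]
  · simp only [hc, Bool.false_eq_true, if_false]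
    rw [PySem.Dict.getD_insert_self, PySem.Dict.insert_insert_self,
      PySem.Dict.getD_of_not_contains _ _ (by simpa using hc)]

-- ---- the split loop bodies of A's port ----

def pvTcA (d : PySem.Dict String Int) (tup : String × String) : PySem.Dict String Int :=
  d.modify tup.2 0 (· + 1)

def pvWptA (d : PySem.Dict String (PySem.Dict String Int)) (tup : String × String) :
    PySem.Dict String (PySem.Dict String Int) :=
  let d0 := if d.contains tup.2 then d else d.insert tup.2 PySem.Dict.empty
  d0.insert tup.2 ((d0.getD tup.2 PySem.Dict.empty).modify tup.1 0 (· + 1))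

def pvTpwA (d : PySem.Dict String (PySem.Dict String Int)) (tup : String × String) :
    PySem.Dict String (PySem.Dict String Int) :=
  let d0 := if d.contains tup.1 then d else d.insert tup.1 PySem.Dict.empty
  d0.insert tup.1 ((d0.getD tup.1 PySem.Dict.empty).modify tup.2 0 (· + 1))

theorem pvBodyA_split : pvBodyA = fun ds tup => (pvTcA ds.1 tup, pvWptA ds.2.1 tup, pvTpwA ds.2.2 tup) := rfl

-- per-component characterisations of A's folds
theorem pv_foldl_wptA (l : List (String × String)) :
    l.foldl pvWptA PySem.Dict.empty = pvGCanon (fun q => q.2) (fun q => q.1) l := by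
  have h : l.foldl pvWptA PySem.Dict.empty
      = l.foldl (pvGStep (fun q => q.2) (fun q => q.1)) PySem.Dict.empty :=
    PySem.List.foldl_congr_mem _ _ _ _ (fun d (tup : String × String) _ => pv_stepA_reduce d tup.2 tup.1)
  rw [h]
  exact pv_foldl_gStep _ _ l

theorem pv_foldl_tpwA (l : List (String × String)) :
    l.foldl pvTpwA PySem.Dict.empty = pvGCanon (fun q => q.1) (fun q => q.2) l := by
  have h : l.foldl pvTpwA PySem.Dict.empty
      = l.foldl (pvGStep (fun q => q.1) (fun q => q.2)) PySem.Dict.empty :=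
    PySem.List.foldl_congr_mem _ _ _ _ (fun d (tup : String × String) _ => pv_stepA_reduce d tup.1 tup.2)
  rw [h]
  exact pv_foldl_gStep _ _ l

theorem pv_foldl_tcA (l : List (String × String)) :
    l.foldl pvTcA PySem.Dict.empty = PySem.Dict.counter (l.map (fun p => p.2)) := by
  rw [PySem.Dict.counter_eq_foldl, List.foldl_map]
  rfl

-- ---- counts of a projected filtered list ARE pair counts (B's counting scheme) ----

theorem pv_count_fst_filter (pairs : List (String × String)) (w t : String) :
    ((pairs.filter (fun q => q.2 == t)).map (fun q => q.1)).count w = pairs.count (w, t) := by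
  rw [pv_count_map, List.countP_filter, List.count_eq_countP]
  apply List.countP_congr
  intro q _
  constructor
  · intro hb
    rcases Bool.and_eq_true_iff.mp hb with ⟨h1, h2⟩
    have : q = (w, t) := Prod.ext (eq_of_beq h1) (eq_of_beq h2)
    simp [this]
  · intro hb
    have : q = (w, t) := eq_of_beq hb
    subst this
    simp

theorem pv_count_snd_filter (pairs : List (String × String)) (w t : String) :
    ((pairs.filter (fun q => q.1 == w)).map (fun q => q.2)).count t = pairs.count (w, t) := by
  rw [pv_count_map, List.countP_filter, List.count_eq_countP]
  apply List.countP_congr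
  intro q _
  constructor
  · intro hb
    rcases Bool.and_eq_true_iff.mp hb with ⟨h1, h2⟩
    have : q = (w, t) := Prod.ext (eq_of_beq h2) (eq_of_beq h1)
    simp [this]
  · intro hb
    have : q = (w, t) := eq_of_beq hb
    subst this
    simp

-- ---- the items of A's canonical dicts are exactly B's comprehensions ----

theorem pv_gCanon_items_wpt (pairs : List (String × String)) :
    (pvGCanon (fun q => q.2) (fun q => q.1) pairs).items.map (fun p => (p.1, p.2.items))
      = (PySem.Set.ofList (pairs.map (fun p => p.2))).map (fun t =>
          (t, (PySem.List.dedup ((pairs.filter (fun q => q.2 == t)).map (fun q => q.1))).map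
                (fun w => (w, (pairs.count (w, t) : Int))))) := by
  show (List.map _ (List.map _ _)) = _
  rw [List.map_map]
  apply List.map_congr_left
  intro t ht
  simp only [Function.comp_apply]
  rw [PySem.Dict.items_counter, PySem.List.dedup_eq_ofList]
  refine congrArg (Prod.mk t) (List.map_congr_left ?_)
  intro w hw
  rw [pv_count_fst_filter]

theorem pv_gCanon_items_tpw (pairs : List (String × String)) :
    (pvGCanon (fun q => q.1) (fun q => q.2) pairs).items.map (fun p => (p.1, p.2.items))
      = (PySem.Set.ofList (pairs.map (fun p => p.1))).map (fun w =>
          (w, (PySem.List.dedup ((pairs.filter (fun q => q.1 == w)).map (fun q => q.2))).map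
                (fun tg => (tg, (pairs.count (w, tg) : Int))))) := by
  show (List.map _ (List.map _ _)) = _
  rw [List.map_map]
  apply List.map_congr_left
  intro w hw
  simp only [Function.comp_apply]
  rw [PySem.Dict.items_counter, PySem.List.dedup_eq_ofList]
  refine congrArg (Prod.mk w) (List.map_congr_left ?_)
  intro tg htg
  rw [pv_count_snd_filter]

-- ---- main equivalence ----

theorem pv_main (sents : List (List (String × String))) :
    calculate_counts sents = calculate_counts_alt sents := by
  simp only [calculate_counts, calculate_counts_alt]
  rw [List.flatMap_id']
  -- A's inner index loop is a fold over the sentence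
  have hA : sents.foldl
      (fun (st : Int × PySem.Dict String Int × PySem.Dict String (PySem.Dict String Int) ×
          PySem.Dict String (PySem.Dict String Int)) sent =>
        (st.1 + (sent.length : Int),
          (PySem.List.pyRange 0 (sent.length : Int) 1).foldl
            (fun ds i => pvBodyA ds (PySem.List.pyGetD sent i ("", ""))) st.2))
      ((0 : Int), PySem.Dict.empty, PySem.Dict.empty, PySem.Dict.empty)
    = sents.foldl
      (fun st sent => (st.1 + (sent.length : Int), sent.foldl pvBodyA st.2))
      ((0 : Int), PySem.Dict.empty, PySem.Dict.empty, PySem.Dict.empty) :=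
    PySem.List.foldl_congr_mem _ _ _ _ (fun st (sent : List (String × String)) _ => by
      rw [PySem.List.foldl_pyRange_zero_pyGetD' sent ("", "") pvBodyA st.2])
  rw [hA]
  -- split the sentence loop into the count and the dict part
  rw [PySem.List.foldl_prod_mk (f := fun (a : Int) (sent : List (String × String)) => a + (sent.length : Int))
    (g := fun ds (sent : List (String × String)) => sent.foldl pvBodyA ds)]
  rw [← List.foldl_flatten, PySem.List.foldl_add (g := fun (sent : List (String × String)) => (sent.length : Int))]
  -- split the three dictionaries
  rw [pvBodyA_split]
  rw [PySem.List.foldl_prod_mk (f := pvTcA)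
    (g := fun ds2 (tup : String × String) => (pvWptA ds2.1 tup, pvTpwA ds2.2 tup))]
  rw [PySem.List.foldl_prod_mk (f := pvWptA) (g := pvTpwA)]
  rw [pv_foldl_tcA, pv_foldl_wptA, pv_foldl_tpwA]
  rw [PySem.Dict.items_counter, pv_gCanon_items_wpt, pv_gCanon_items_tpw]
  -- sizes: number of keys of each canonical dict
  have hsz1 : ((pvGCanon (fun q => q.1) (fun q => q.2) sents.flatten).size : Int)
      = ((PySem.List.dedup (sents.flatten.map (fun p => p.1))).length : Int) := by
    simp [pvGCanon, PySem.Dict.size]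
  have hsz2 : ((pvGCanon (fun q => q.2) (fun q => q.1) sents.flatten).size : Int)
      = ((PySem.List.dedup (sents.flatten.map (fun p => p.2))).length : Int) := by
    simp [pvGCanon, PySem.Dict.size]
  rw [hsz1, hsz2]
  -- the word-occurrence count and dedup vs Set.ofList
  have hlen : (0 : Int) + (sents.map (fun sent => (sent.length : Int))).sum
      = (sents.flatten.length : Int) := by
    rw [List.length_flatten, Nat.cast_list_sum, List.map_map]
    simp [Function.comp_def]
  rw [hlen]
  simp [PySem.List.dedup_eq_ofList]

-- ===== VERDICT (by name: the statement is the Claim_ definition above) =====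
theorem calculate_counts_spec : Claim_equal_calculate_counts := by
  intro sents _
  unfold Spec_calculate_counts
  exact pv_main sents
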